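-- pv_equiv track=rewrite | github.com/EternityForest/GenFortune | Python Version/OpenFortune.py | fixCap
-- ===== SOURCE A (Python) =====
-- def fixCap(string):
--     output = ""
--     inasentence = False
--     for i in string:
--         if inasentence:
--             output+=(i)
--             if i== '.':
--                 inasentence = False
--         else:
--             output+=(i.upper())
--             if not i ==" ":
--                 inasentence = True
--
--     return output.replace(" i "," I ")
-- ===== SOURCE B (Python) =====
-- def fixCap(string):
--     # Scan sentence-by-sentence: at each boundary copy the run of spaces,
--     # uppercase the first non-space char, then copy verbatim up to and
--     # including the next '.', which is the next boundary.
--     out = []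
--     i = 0
--     n = len(string)
--     while i < n:
--         j = i
--         while j < n and string[j] == ' ':
--             j += 1
--         out.append(string[i:j])
--         if j < n:
--             out.append(string[j].upper())
--             k = string.find('.', j + 1)
--             k = n if k == -1 else k + 1
--             out.append(string[j + 1:k])
--             i = k
--         else:
--             i = j
--     return ''.join(out).replace(' i ', ' I ')
-- ===== Notes on version B (the rewrite author's own statement) =====
-- stated objective: faster
-- what changed: Replaces the per-character inasentence state machine with a sentence-at-a-time scanner that copies the space run at each boundary, uppercases the first non-space character, and bulk-copies up to the next period using str.find and slicing.
import Mathlib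
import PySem

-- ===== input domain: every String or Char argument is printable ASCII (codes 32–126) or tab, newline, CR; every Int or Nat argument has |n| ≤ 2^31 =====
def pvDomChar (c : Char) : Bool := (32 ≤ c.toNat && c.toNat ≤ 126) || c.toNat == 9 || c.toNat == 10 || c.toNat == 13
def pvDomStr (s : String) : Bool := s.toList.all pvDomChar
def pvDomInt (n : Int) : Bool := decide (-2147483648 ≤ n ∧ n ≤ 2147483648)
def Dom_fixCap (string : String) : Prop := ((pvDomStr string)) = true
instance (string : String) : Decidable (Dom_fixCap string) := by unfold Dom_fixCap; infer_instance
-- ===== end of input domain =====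

-- B replaces A's per-character state machine by a sentence-at-a-time scanner (skip spaces,
-- uppercase one char, bulk-copy through the next period); same return value, measured faster (constant factor).

-- ===== PORT A =====
-- for i in string: if inasentence: copy, '.' leaves sentence; else: upper-copy, non-space enters.
-- i.upper() on a 1-char string is PySem.Chars.upperChar (exact on the ASCII domain).
def fixCap (string : String) : String :=
  let r := string.toList.foldl
    (fun (st : List Char × Bool) i =>
      if st.2 then
        (st.1 ++ [i], if i = '.' then false else st.2)
      else
        (st.1 ++ [PySem.Chars.upperChar i], if ¬ (i = ' ') then true else st.2))
    ([], false)
  String.ofList (PySem.Chars.replace r.1 [' ', 'i', ' '] [' ', 'I', ' '])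

-- ===== PORT B =====
-- string.find('.', j+1) followed by the slice string[j+1:k] (k = match index + 1, or n):
-- ported as splitAfterDot, which returns (the chars up to and including the next '.', the rest).
def splitAfterDot : List Char → List Char × List Char
  | [] => ([], [])
  | c :: t =>
      if c = '.' then ([c], t)
      else
        let p := splitAfterDot t
        (c :: p.1, p.2)

theorem splitAfterDot_snd_length_le (t : List Char) : (splitAfterDot t).2.length ≤ t.length := by
  induction t with
  | nil => simp [splitAfterDot]
  | cons c r ih =>
      simp only [splitAfterDot]
      split
      · simp
      · simpa using Nat.le_succ_of_le ih

-- the outer while-loop of B: inner space-skip = List.span, then one uppercased char,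
-- then the sentence tail found via splitAfterDot, then recurse from the next boundary.
def bScan (cs : List Char) : List Char :=
  match _h : cs.span (· == ' ') with
  | (sp, []) => sp
  | (sp, x :: t) =>
      let p := splitAfterDot t
      sp ++ PySem.Chars.upperChar x :: (p.1 ++ bScan p.2)
termination_by cs.length
decreasing_by
  have h2 : x :: t = cs.dropWhile (· == ' ') := by
    have := congrArg Prod.snd _h
    simpa [List.span_eq_takeWhile_dropWhile] using this.symm
  have hlt : t.length < cs.length := by
    have hd : (cs.dropWhile (· == ' ')).length ≤ cs.length :=
      List.length_dropWhile_le _ _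
    have : (x :: t).length ≤ cs.length := by rw [h2]; exact hd
    simpa using this
  exact Nat.lt_of_le_of_lt (splitAfterDot_snd_length_le t) hlt

def fixCap_alt (string : String) : String :=
  String.ofList (PySem.Chars.replace (bScan string.toList) [' ', 'i', ' '] [' ', 'I', ' '])

-- ===== PRECONDITION & SPEC =====
def Spec_fixCap (string : String) (out : String) : Prop := out = fixCap_alt string
instance (string : String) (out : String) : Decidable (Spec_fixCap string out) := by unfold Spec_fixCap; infer_instance

-- ===== CLAIM (what is proved, stated in full; the proofs are below) =====
def Claim_equal_fixCap : Prop := ∀ (string : String), Dom_fixCap string → Spec_fixCap string (fixCap string)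

-- ===== LEMMAS AND PROOFS =====

-- A's loop, as output-producing recursion on (flag, chars)
def loopA : Bool → List Char → List Char
  | _, [] => []
  | false, c :: t => PySem.Chars.upperChar c :: loopA (decide ¬ (c = ' ')) t
  | true, c :: t => c :: loopA (decide ¬ (c = '.')) t

theorem foldl_eq_loopA (cs : List Char) (acc : List Char) (flag : Bool) :
    (cs.foldl
      (fun (st : List Char × Bool) i =>
        if st.2 then
          (st.1 ++ [i], if i = '.' then false else st.2)
        else
          (st.1 ++ [PySem.Chars.upperChar i], if ¬ (i = ' ') then true else st.2))
      (acc, flag)).1 = acc ++ loopA flag cs := by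
  induction cs generalizing acc flag with
  | nil => simp [loopA]
  | cons c t ih =>
      cases flag with
      | false =>
          by_cases hc : c = ' '
          · subst hc
            rw [List.foldl_cons, if_neg (by simp), if_neg (by simp)]
            rw [ih, loopA]
            simp
          · rw [List.foldl_cons, if_neg (by simp), if_pos (by simpa using hc)]
            rw [ih]
            simp [loopA, hc]
      | true =>
          by_cases hc : c = '.'
          · subst hc
            rw [List.foldl_cons, if_pos rfl, if_pos rfl]
            rw [ih, loopA]
            simp
          · rw [List.foldl_cons, if_pos rfl, if_neg hc]
            rw [ih]
            simp [loopA, hc]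

theorem upperChar_space : PySem.Chars.upperChar ' ' = ' ' := by decide

theorem loopA_false_spaces_append (sp l : List Char) (h : ∀ c ∈ sp, c = ' ') :
    loopA false (sp ++ l) = sp ++ loopA false l := by
  induction sp with
  | nil => simp
  | cons c t ih =>
      have hc : c = ' ' := h c (by simp)
      subst hc
      have := ih (fun c hc => h c (by simp [hc]))
      simp [loopA, upperChar_space, this]

theorem loopA_false_spaces (sp : List Char) (h : ∀ c ∈ sp, c = ' ') :
    loopA false sp = sp := by
  have := loopA_false_spaces_append sp [] h
  simpa [loopA] using this

theorem loopA_true_split (t : List Char) :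
    loopA true t = (splitAfterDot t).1 ++ loopA false (splitAfterDot t).2 := by
  induction t with
  | nil => simp [splitAfterDot, loopA]
  | cons c r ih =>
      by_cases hc : c = '.'
      · simp [splitAfterDot, loopA, hc]
      · simp [splitAfterDot, loopA, hc, ih]

theorem bScan_eq_loopA_false_aux : ∀ (n : Nat) (cs : List Char), cs.length ≤ n → bScan cs = loopA false cs := by
  intro n
  induction n with
  | zero =>
      intro cs h
      have : cs = [] := List.eq_nil_of_length_eq_zero (Nat.le_zero.mp h)
      subst this
      rw [bScan]
      split
      next sp hsp =>
        have hsp' : sp = [] := by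
          simpa [List.span_eq_takeWhile_dropWhile] using (congrArg Prod.fst hsp).symm
        simp [hsp', loopA]
      next sp x t hsp =>
        exfalso
        simp [List.span_eq_takeWhile_dropWhile] at hsp
  | succ n ih =>
      intro cs hle
      rw [bScan]
      cases h : cs.span (· == ' ') with
      | mk sp r =>
        have hsp : sp = cs.takeWhile (· == ' ') := by
          have := congrArg Prod.fst h
          simpa [List.span_eq_takeWhile_dropWhile] using this.symm
        have hr : r = cs.dropWhile (· == ' ') := by
          have := congrArg Prod.snd h
          simpa [List.span_eq_takeWhile_dropWhile] using this.symm
        have hcs : cs = sp ++ r := by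
          rw [hsp, hr]; exact (List.takeWhile_append_dropWhile).symm
        have hspaces : ∀ c ∈ sp, c = ' ' := by
          intro c hc
          have := List.mem_takeWhile_imp (hsp ▸ hc)
          simpa using this
        cases r with
        | nil =>
            simp only []
            rw [hcs]
            simpa using (loopA_false_spaces sp hspaces).symm
        | cons x t =>
            have hx : ¬ (x = ' ') := by
              have hne : cs.dropWhile (· == ' ') ≠ [] := by
                rw [← hr]; simp
              have hnot := List.head_dropWhile_not (· == ' ') hne
              have hhead : (cs.dropWhile (· == ' ')).head hne = x := by
                simp only [← hr]
                rfl
              rw [hhead] at hnot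
              simpa using hnot
            have hlen : (splitAfterDot t).2.length ≤ n := by
              have h1 : (splitAfterDot t).2.length ≤ t.length := splitAfterDot_snd_length_le t
              have h2 : t.length + 1 ≤ cs.length := by
                rw [hcs]; simp
              omega
            rw [hcs, loopA_false_spaces_append sp _ hspaces]
            have : loopA false (x :: t) = PySem.Chars.upperChar x :: loopA true t := by
              simp [loopA, hx]
            rw [this, loopA_true_split, ← ih _ hlen]

theorem bScan_eq_loopA_false (cs : List Char) : bScan cs = loopA false cs :=
  bScan_eq_loopA_false_aux cs.length cs le_rfl

-- ===== VERDICT (by name: the statement is the Claim_ definition above) =====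
theorem fixCap_spec : Claim_equal_fixCap := by
  intro s _
  unfold Spec_fixCap fixCap fixCap_alt
  simp only [foldl_eq_loopA, bScan_eq_loopA_false, List.nil_append]
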